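-- pv_equiv track=rewrite | github.com/hojoungjang/programming-exercises | 2941-크로아티아-알파벳/solution.py | solution
-- ===== SOURCE A (Python) =====
-- def solution(word):
--     i = 0
--     cnt = 0
--     while i < len(word):
--         if word[i:i+2] == "c=":
--             i += 2
--         elif word[i:i+2] == "c-":
--             i += 2
--         elif word[i:i+3] == "dz=":
--             i += 3
--         elif word[i:i+2] == "d-":
--             i += 2
--         elif word[i:i+2] == "lj":
--             i += 2
--         elif word[i:i+2] == "nj":
--             i += 2
--         elif word[i:i+2] == "s=":
--             i += 2
--         elif word[i:i+2] == "z=":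
--             i += 2
--         else:
--             i += 1
--         cnt += 1
--     return cnt
-- ===== SOURCE B (Python) =====
-- def solution(word):
--     # total letters = total chars minus one per counted token occurrence
--     # ("dz=" occurrences are counted by both "dz=" and "z=", giving the needed 2)
--     tokens = ["c=", "c-", "dz=", "d-", "lj", "nj", "s=", "z="]
--     return len(word) - sum(word.count(t) for t in tokens)
-- ===== Notes on version B (the rewrite author's own statement) =====
-- stated objective: simpler
-- what changed: Replaces the positional greedy while-loop scan with a closed arithmetic formula: len(word) minus one per substring occurrence of each token (counting dz= occurrences under both dz= and z= yields the length-3 token's reduction of 2), valid because no two tokens can overlap except z= inside dz=.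
import Mathlib
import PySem

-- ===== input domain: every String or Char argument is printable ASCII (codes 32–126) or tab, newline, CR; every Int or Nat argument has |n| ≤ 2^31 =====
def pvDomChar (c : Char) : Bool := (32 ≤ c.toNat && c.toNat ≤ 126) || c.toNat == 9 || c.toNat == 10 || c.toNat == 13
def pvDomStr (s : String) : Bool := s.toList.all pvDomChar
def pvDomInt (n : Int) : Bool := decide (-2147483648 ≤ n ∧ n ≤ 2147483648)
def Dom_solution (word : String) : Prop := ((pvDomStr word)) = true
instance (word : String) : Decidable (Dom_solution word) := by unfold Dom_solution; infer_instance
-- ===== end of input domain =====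

-- B replaces A's positional greedy while-loop scan by the arithmetic formula
-- len(word) - Σ word.count(token): simpler, one line instead of an index loop.


-- ===== PORT A =====
-- the while loop, as recursion on the remaining length (i only grows from 0, so it stays a Nat)
def solutionGo (word : List Char) (i : Nat) (cnt : Int) : Int :=
  if _h : i < word.length then
    if PySem.List.slice word (some (i : Int)) (some ((i : Int) + 2)) = ['c', '='] then
      solutionGo word (i + 2) (cnt + 1)
    else if PySem.List.slice word (some (i : Int)) (some ((i : Int) + 2)) = ['c', '-'] then
      solutionGo word (i + 2) (cnt + 1)
    else if PySem.List.slice word (some (i : Int)) (some ((i : Int) + 3)) = ['d', 'z', '='] then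
      solutionGo word (i + 3) (cnt + 1)
    else if PySem.List.slice word (some (i : Int)) (some ((i : Int) + 2)) = ['d', '-'] then
      solutionGo word (i + 2) (cnt + 1)
    else if PySem.List.slice word (some (i : Int)) (some ((i : Int) + 2)) = ['l', 'j'] then
      solutionGo word (i + 2) (cnt + 1)
    else if PySem.List.slice word (some (i : Int)) (some ((i : Int) + 2)) = ['n', 'j'] then
      solutionGo word (i + 2) (cnt + 1)
    else if PySem.List.slice word (some (i : Int)) (some ((i : Int) + 2)) = ['s', '='] then
      solutionGo word (i + 2) (cnt + 1)
    else if PySem.List.slice word (some (i : Int)) (some ((i : Int) + 2)) = ['z', '='] then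
      solutionGo word (i + 2) (cnt + 1)
    else
      solutionGo word (i + 1) (cnt + 1)
  else cnt
termination_by word.length - i
decreasing_by all_goals omega

def solution (word : String) : Int := solutionGo word.toList 0 0

-- ===== PORT B =====
def pvTokens : List String := ["c=", "c-", "dz=", "d-", "lj", "nj", "s=", "z="]

def solution_alt (word : String) : Int :=
  PySem.Str.len word - (pvTokens.map (fun t => (PySem.Str.count word t : Int))).sum

-- ===== PRECONDITION & SPEC =====
def Spec_solution (word : String) (out : Int) : Prop := out = solution_alt word
instance (word : String) (out : Int) : Decidable (Spec_solution word out) := by unfold Spec_solution; infer_instance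

-- ===== CLAIM (what is proved, stated in full; the proofs are below) =====
def Claim_equal_solution : Prop := ∀ (word : String), Dom_solution word → Spec_solution word (solution word)

-- ===== LEMMAS AND PROOFS =====

-- shifting the accumulator out of PySem.Chars.count.go
theorem go_acc (sub : List Char) : ∀ (f : Nat) (l : List Char) (acc : Nat),
    PySem.Chars.count.go sub f l acc = acc + PySem.Chars.count.go sub f l 0 := by
  intro f
  induction f with
  | zero => intro l acc; simp [PySem.Chars.count.go]
  | succ f ih =>
    intro l acc
    cases l with
    | nil => simp [PySem.Chars.count.go]
    | cons c t =>
      simp only [PySem.Chars.count.go]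
      split
      · rw [ih _ (acc+1), ih _ (0+1)]; omega
      · rw [ih t acc]

-- PySem.Chars.count.go is fuel-insensitive once fuel ≥ length
theorem go_fuel (sub : List Char) (hs : sub ≠ []) : ∀ (f : Nat) (l : List Char) (acc : Nat),
    l.length ≤ f → PySem.Chars.count.go sub f l acc = PySem.Chars.count.go sub l.length l acc := by
  intro f
  induction f using Nat.strong_induction_on with
  | _ f ih =>
    intro l acc h
    match f, l with
    | f, [] => cases f <;> simp [PySem.Chars.count.go]
    | f + 1, c :: t =>
      have hsl : 1 ≤ sub.length := by cases sub <;> simp_all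
      simp only [List.length_cons] at h ⊢
      simp only [PySem.Chars.count.go]
      split
      · rw [ih f (by omega) _ (acc+1) (by simp; omega),
            ih t.length (by omega) _ (acc+1) (by simp; omega)]
      · rw [ih f (by omega) t acc (by omega), ih t.length (by omega) t acc (by omega)]

theorem count_nil (sub : List Char) (hs : sub ≠ []) : PySem.Chars.count [] sub = 0 := by
  simp [PySem.Chars.count, PySem.Chars.count.go, hs]

theorem count_cons_of_not_prefix (sub : List Char) (hs : sub ≠ []) (c : Char) (t : List Char)
    (h : ¬ sub <+: (c :: t)) : PySem.Chars.count (c :: t) sub = PySem.Chars.count t sub := by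
  have hp : sub.isPrefixOf (c :: t) = false :=
    eq_false_of_ne_true (by simpa [List.isPrefixOf_iff_prefix] using h)
  simp [PySem.Chars.count, hs]
  simp only [PySem.Chars.count.go, hp]
  simp

theorem count_of_prefix (sub : List Char) (hs : sub ≠ []) (l : List Char)
    (h : sub <+: l) : PySem.Chars.count l sub = 1 + PySem.Chars.count (l.drop sub.length) sub := by
  cases l with
  | nil => exact absurd (List.prefix_nil.mp h) hs
  | cons c t =>
    have hsl : 1 ≤ sub.length := by cases sub <;> simp_all
    have hp : sub.isPrefixOf (c :: t) = true := by
      simpa [List.isPrefixOf_iff_prefix] using h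
    simp [PySem.Chars.count, hs]
    simp only [PySem.Chars.count.go, hp]
    simp only [if_true]
    rw [go_fuel sub hs t.length _ _ (by simp; omega), go_acc]
    simp [List.length_drop]

-- one unrolling step, with the prefix test left as a Boolean `if` that simp can evaluate
theorem count_step (sub : List Char) (hs : sub ≠ []) (c : Char) (t : List Char) :
    PySem.Chars.count (c :: t) sub =
      if sub.isPrefixOf (c :: t) then 1 + PySem.Chars.count ((c :: t).drop sub.length) sub
      else PySem.Chars.count t sub := by
  split
  · exact count_of_prefix sub hs _ (List.isPrefixOf_iff_prefix.mp (by assumption))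
  · exact count_cons_of_not_prefix sub hs c t (fun hp => by
      simp [← List.isPrefixOf_iff_prefix] at hp; simp_all)

-- total number of token occurrences (the sum B subtracts), on the char-list side
def pvC (l : List Char) : Nat :=
  PySem.Chars.count l ['c','='] + PySem.Chars.count l ['c','-'] +
  PySem.Chars.count l ['d','z','='] + PySem.Chars.count l ['d','-'] +
  PySem.Chars.count l ['l','j'] + PySem.Chars.count l ['n','j'] +
  PySem.Chars.count l ['s','='] + PySem.Chars.count l ['z','='] 

theorem pvC_nil : pvC [] = 0 := by
  simp [pvC, count_nil]

-- loop invariant: what remains of the scan contributes (remaining length) − (occurrences in the remainder)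
theorem go_spec (word : List Char) : ∀ (n i : Nat) (cnt : Int), word.length - i ≤ n →
    solutionGo word i cnt = cnt + ((word.drop i).length : Int) - (pvC (word.drop i) : Int) := by
  intro n
  induction n with
  | zero =>
    intro i cnt h
    have hi : ¬ i < word.length := by omega
    rw [solutionGo, dif_neg hi, List.drop_eq_nil_of_le (by omega)]
    simp [pvC_nil]
  | succ n ih =>
    intro i cnt h
    by_cases hi : i < word.length
    · have h2 : PySem.List.slice word (some (i : Int)) (some ((i : Int) + 2))
          = (word.drop i).take 2 := by
        rw [show ((i : Int) + 2) = ((i + 2 : Nat) : Int) by push_cast; ring,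
            PySem.List.slice_natCast]
        congr 1; omega
      have h3 : PySem.List.slice word (some (i : Int)) (some ((i : Int) + 3))
          = (word.drop i).take 3 := by
        rw [show ((i : Int) + 3) = ((i + 3 : Nat) : Int) by push_cast; ring,
            PySem.List.slice_natCast]
        congr 1; omega
      have hlen : (word.drop i).length = word.length - i := List.length_drop
      obtain ⟨a, t, hl⟩ : ∃ a t, word.drop i = a :: t := by
        cases hd : word.drop i with
        | nil => exfalso; rw [hd] at hlen; simp at hlen; omega
        | cons a t => exact ⟨a, t, rfl⟩
      have hd1 : word.drop (i + 1) = t := by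
        rw [← List.drop_drop, hl, List.drop_one, List.tail_cons]
      rw [solutionGo, dif_pos hi, h2, h3, hl]
      rw [hl] at hlen
      cases t with
      | nil =>
        split_ifs with hc1 hc2 hc3 hc4 hc5 hc6 hc7 hc8
        · exact absurd hc1 (by simp)
        · exact absurd hc2 (by simp)
        · exact absurd hc3 (by simp)
        · exact absurd hc4 (by simp)
        · exact absurd hc5 (by simp)
        · exact absurd hc6 (by simp)
        · exact absurd hc7 (by simp)
        · exact absurd hc8 (by simp)
        rw [ih (i + 1) (cnt + 1) (by omega), hd1]
        have hC : pvC [a] = 0 := by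
          simp [pvC, count_step, List.isPrefixOf, count_nil]
        rw [hC, pvC_nil]
        simp
      | cons b r =>
        have hd2 : word.drop (i + 2) = r := by
          rw [← List.drop_drop, hl]; rfl
        split_ifs with hc1 hc2 hc3 hc4 hc5 hc6 hc7 hc8
        · obtain ⟨rfl, rfl⟩ : a = 'c' ∧ b = '=' := by simpa using hc1
          rw [ih (i + 2) (cnt + 1) (by omega), hd2]
          have hC : pvC ('c' :: '=' :: r) = 1 + pvC r := by
            simp [pvC, count_step, List.isPrefixOf]; try omega
          rw [hC]; push_cast [List.length_cons]; omega
        · obtain ⟨rfl, rfl⟩ : a = 'c' ∧ b = '-' := by simpa using hc2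
          rw [ih (i + 2) (cnt + 1) (by omega), hd2]
          have hC : pvC ('c' :: '-' :: r) = 1 + pvC r := by
            simp [pvC, count_step, List.isPrefixOf]; try omega
          rw [hC]; push_cast [List.length_cons]; omega
        · obtain ⟨rfl, rfl, hr⟩ : a = 'd' ∧ b = 'z' ∧ r.take 1 = ['='] := by
            simpa using hc3
          cases r with
          | nil => exfalso; simp at hr
          | cons c3 rr =>
            obtain rfl : c3 = '=' := by simpa using hr
            have hd3 : word.drop (i + 3) = rr := by
              rw [← List.drop_drop, hl]; rfl
            rw [ih (i + 3) (cnt + 1) (by omega), hd3]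
            have hC : pvC ('d' :: 'z' :: '=' :: rr) = 2 + pvC rr := by
              simp [pvC, count_step, List.isPrefixOf]; try omega
            rw [hC]; push_cast [List.length_cons]; omega
        · obtain ⟨rfl, rfl⟩ : a = 'd' ∧ b = '-' := by simpa using hc4
          rw [ih (i + 2) (cnt + 1) (by omega), hd2]
          have hC : pvC ('d' :: '-' :: r) = 1 + pvC r := by
            simp [pvC, count_step, List.isPrefixOf]; try omega
          rw [hC]; push_cast [List.length_cons]; omega
        · obtain ⟨rfl, rfl⟩ : a = 'l' ∧ b = 'j' := by simpa using hc5
          rw [ih (i + 2) (cnt + 1) (by omega), hd2]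
          have hC : pvC ('l' :: 'j' :: r) = 1 + pvC r := by
            simp [pvC, count_step, List.isPrefixOf]; try omega
          rw [hC]; push_cast [List.length_cons]; omega
        · obtain ⟨rfl, rfl⟩ : a = 'n' ∧ b = 'j' := by simpa using hc6
          rw [ih (i + 2) (cnt + 1) (by omega), hd2]
          have hC : pvC ('n' :: 'j' :: r) = 1 + pvC r := by
            simp [pvC, count_step, List.isPrefixOf]; try omega
          rw [hC]; push_cast [List.length_cons]; omega
        · obtain ⟨rfl, rfl⟩ : a = 's' ∧ b = '=' := by simpa using hc7
          rw [ih (i + 2) (cnt + 1) (by omega), hd2]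
          have hC : pvC ('s' :: '=' :: r) = 1 + pvC r := by
            simp [pvC, count_step, List.isPrefixOf]; try omega
          rw [hC]; push_cast [List.length_cons]; omega
        · obtain ⟨rfl, rfl⟩ : a = 'z' ∧ b = '=' := by simpa using hc8
          rw [ih (i + 2) (cnt + 1) (by omega), hd2]
          have hC : pvC ('z' :: '=' :: r) = 1 + pvC r := by
            simp [pvC, count_step, List.isPrefixOf]; try omega
          rw [hC]; push_cast [List.length_cons]; omega
        · rw [ih (i + 1) (cnt + 1) (by omega), hd1]
          have hC : pvC (a :: b :: r) = pvC (b :: r) := by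
            simp only [pvC]
            rw [count_cons_of_not_prefix ['c','='] (by decide) a (b :: r)
                  (fun hp => hc1 (by simpa using (List.prefix_iff_eq_take.mp hp).symm)),
                count_cons_of_not_prefix ['c','-'] (by decide) a (b :: r)
                  (fun hp => hc2 (by simpa using (List.prefix_iff_eq_take.mp hp).symm)),
                count_cons_of_not_prefix ['d','z','='] (by decide) a (b :: r)
                  (fun hp => hc3 (by simpa using (List.prefix_iff_eq_take.mp hp).symm)),
                count_cons_of_not_prefix ['d','-'] (by decide) a (b :: r)
                  (fun hp => hc4 (by simpa using (List.prefix_iff_eq_take.mp hp).symm)),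
                count_cons_of_not_prefix ['l','j'] (by decide) a (b :: r)
                  (fun hp => hc5 (by simpa using (List.prefix_iff_eq_take.mp hp).symm)),
                count_cons_of_not_prefix ['n','j'] (by decide) a (b :: r)
                  (fun hp => hc6 (by simpa using (List.prefix_iff_eq_take.mp hp).symm)),
                count_cons_of_not_prefix ['s','='] (by decide) a (b :: r)
                  (fun hp => hc7 (by simpa using (List.prefix_iff_eq_take.mp hp).symm)),
                count_cons_of_not_prefix ['z','='] (by decide) a (b :: r)
                  (fun hp => hc8 (by simpa using (List.prefix_iff_eq_take.mp hp).symm))]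
          rw [hC]; push_cast [List.length_cons]; omega
    · rw [solutionGo, dif_neg hi, List.drop_eq_nil_of_le (by omega)]
      simp [pvC_nil]

-- ===== VERDICT (by name: the statement is the Claim_ definition above) =====
theorem solution_spec : Claim_equal_solution := by
  intro word _
  unfold Spec_solution solution solution_alt pvTokens
  rw [go_spec word.toList (word.toList.length) 0 0 (by omega)]
  simp [PySem.Str.count_eq, PySem.Str.len_eq, pvC,
    show "c=".toList = ['c','='] from rfl, show "c-".toList = ['c','-'] from rfl,
    show "dz=".toList = ['d','z','='] from rfl, show "d-".toList = ['d','-'] from rfl,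
    show "lj".toList = ['l','j'] from rfl, show "nj".toList = ['n','j'] from rfl,
    show "s=".toList = ['s','='] from rfl, show "z=".toList = ['z','='] from rfl]
  omega
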